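-- pv_equiv track=rewrite | github.com/WeilabMSU/PKHT | KHomology.py | get_k_strings
-- ===== SOURCE A (Python) =====
-- from itertools import combinations
--
-- def get_k_strings(k, total_length):
--     """Generate all k-strings with exactly k '1's, ordered lexicographically."""
--     # Generate all combinations of indices where the '1's can be placed
--     if k < 0 or k > total_length:
--         raise ValueError(f"k must be between 0 and {total_length}, but got {k}.")
--     indices_combinations = combinations(range(total_length), k)
--
--     k_strings = []
--     for indices in indices_combinations:
--         # Create a list of '0's
--         binary_string = ['0'] * total_length
--         # Place '1's at the appropriate positions
--         for index in indices:
--             binary_string[index] = '1'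
--         # Convert the list back to a string and append to the result list
--         k_strings.append(''.join(binary_string))
--
--     return k_strings
-- ===== SOURCE B (Python) =====
-- def get_k_strings(k, total_length):
--     """Generate all k-strings with exactly k '1's, ordered lexicographically."""
--     if k < 0 or k > total_length:
--         raise ValueError(f"k must be between 0 and {total_length}, but got {k}.")
--     out = []
--     stack = [(total_length, k, '')]
--     while stack:
--         n, ones, acc = stack.pop()
--         if ones == 0:
--             out.append(acc + '0' * n)
--         elif ones >= n:
--             out.append(acc + '1' * n)
--         else:
--             # push the '0'-branch first so the '1'-branch is popped (emitted) first
--             stack.append((n - 1, ones, acc + '0'))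
--             stack.append((n - 1, ones - 1, acc + '1'))
--     return out
-- ===== Notes on version B (the rewrite author's own statement) =====
-- stated objective: alternative
-- what changed: Replaces the combinations-of-index-tuples enumeration (build a '0' list, overwrite '1's per combination, join) with an explicit-stack DFS that emits each string by branching '1'-first per position, with whole-run shortcuts when no ones or only ones remain.
import Mathlib
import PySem

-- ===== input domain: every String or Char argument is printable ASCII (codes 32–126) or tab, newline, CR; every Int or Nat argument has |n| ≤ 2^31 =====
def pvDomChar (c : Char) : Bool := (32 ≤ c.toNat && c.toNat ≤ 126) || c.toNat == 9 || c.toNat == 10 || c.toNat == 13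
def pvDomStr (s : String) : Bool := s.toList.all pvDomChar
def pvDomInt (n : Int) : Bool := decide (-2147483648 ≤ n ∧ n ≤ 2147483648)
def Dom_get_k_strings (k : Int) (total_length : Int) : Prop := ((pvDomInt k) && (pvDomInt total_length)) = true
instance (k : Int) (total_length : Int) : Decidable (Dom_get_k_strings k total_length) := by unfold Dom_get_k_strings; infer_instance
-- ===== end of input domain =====

-- B replaces the combinations-of-indices enumeration by a direct recursive string builder
-- (place '1' or '0' per position, pruning infeasible branches); objective: alternative decomposition.

-- ===== PORT A =====
-- itertools.combinations(xs, r) in its documented lexicographic order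
def pvCombos : List Int → Nat → List (List Int)
  | _, 0 => [[]]
  | [], _ + 1 => []
  | x :: xs, r + 1 => ((pvCombos xs r).map (fun c => x :: c)) ++ pvCombos xs (r + 1)

-- the inner 'for index in indices: binary_string[index] = 1' loop; indices come from
-- range(total_length), hence are nonnegative and in range, so '.set i.toNat' is exact here
def pvPlaceOnes (bs : List Char) (idxs : List Int) : List Char :=
  idxs.foldl (fun b i => b.set i.toNat '1') bs

def get_k_strings (k : Int) (total_length : Int) : List String :=
  if k < 0 ∨ total_length < k then []   -- Python raises ValueError here (excluded by Pre_)
  else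
    (pvCombos (PySem.List.pyRange 0 total_length 1) k.toNat).map
      (fun idxs => String.mk (pvPlaceOnes (List.replicate total_length.toNat '0') idxs))

-- ===== PORT B =====
-- the while-stack DFS: pop a frame (n, ones, acc); emit a whole run on the shortcut
-- branches, otherwise push the '0'-branch then the '1'-branch (so '1' is popped first)
def pvLoop : List (Nat × Nat × List Char) → List String → List String
  | [], out => out
  | (n, r, acc) :: stack, out =>
      if h1 : r = 0 then pvLoop stack (out ++ [String.mk (acc ++ List.replicate n '0')])
      else if h2 : n ≤ r then pvLoop stack (out ++ [String.mk (acc ++ List.replicate n '1')])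
      else pvLoop ((n - 1, r - 1, acc ++ ['1']) :: (n - 1, r, acc ++ ['0']) :: stack) out
  termination_by stack _ => (stack.map (fun f => 3 ^ f.1)).sum
  decreasing_by
    · simp only [List.map_cons, List.sum_cons]
      have hp : 0 < 3 ^ n := Nat.pow_pos (by norm_num)
      omega
    · simp only [List.map_cons, List.sum_cons]
      have hp : 0 < 3 ^ n := Nat.pow_pos (by norm_num)
      omega
    · simp only [List.map_cons, List.sum_cons]
      have hn : n - 1 + 1 = n := by omega
      have h3 : 3 ^ n = 3 ^ (n - 1) * 3 := by
        conv_lhs => rw [← hn]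
        rw [pow_succ]
      have hp : 0 < 3 ^ (n - 1) := Nat.pow_pos (by norm_num)
      omega

def get_k_strings_alt (k : Int) (total_length : Int) : List String :=
  if k < 0 ∨ total_length < k then []   -- Python raises ValueError here (excluded by Pre_)
  else pvLoop [(total_length.toNat, k.toNat, [])] []

-- ===== PRECONDITION & SPEC =====
-- Pre_ excludes exactly the inputs where both Pythons raise ValueError (k < 0 or k > total_length)
def Pre_get_k_strings (k : Int) (total_length : Int) : Prop := 0 ≤ k ∧ k ≤ total_length
instance (k : Int) (total_length : Int) : Decidable (Pre_get_k_strings k total_length) := by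
  unfold Pre_get_k_strings; infer_instance

def pvWitness_get_k_strings : Int × Int := (2, 5)

def Spec_get_k_strings (k : Int) (total_length : Int) (out : List String) : Prop := out = get_k_strings_alt k total_length
instance (k : Int) (total_length : Int) (out : List String) : Decidable (Spec_get_k_strings k total_length out) := by unfold Spec_get_k_strings; infer_instance

-- ===== CLAIM (what is proved, stated in full; the proofs are below) =====
def Claim_equal_get_k_strings : Prop := ∀ (k : Int) (total_length : Int), Dom_get_k_strings k total_length → Pre_get_k_strings k total_length → Spec_get_k_strings k total_length (get_k_strings k total_length)

-- ===== LEMMAS AND PROOFS =====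

-- the common shape of both enumerations, over Nat size / count
def pvS : Nat → Nat → List (List Char)
  | n, 0 => [List.replicate n '0']
  | 0, _ + 1 => []
  | n + 1, r + 1 => ((pvS n r).map (fun s => '1' :: s)) ++ ((pvS n (r + 1)).map (fun s => '0' :: s))

theorem pvS_empty : ∀ (n r : Nat), n < r → pvS n r = [] := by
  intro n
  induction n with
  | zero => intro r h; cases r with
    | zero => omega
    | succ r => rfl
  | succ n ih =>
    intro r h
    cases r with
    | zero => omega
    | succ r =>
      simp [pvS, ih r (by omega), ih (r+1) (by omega)]

theorem pvS_zero (n : Nat) : pvS n 0 = [List.replicate n '0'] := by cases n <;> rfl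

theorem pvS_diag : ∀ (n : Nat), pvS n n = [List.replicate n '1'] := by
  intro n
  induction n with
  | zero => rfl
  | succ n ih => simp [pvS, ih, pvS_empty n (n+1) (by omega), List.replicate_succ]

-- loop invariant: pvLoop appends, to out, the pvS-strings of every stacked frame in order
theorem pvLoop_eq_S : ∀ (stack : List (Nat × Nat × List Char)) (out : List String),
    (∀ f ∈ stack, f.2.1 ≤ f.1) →
    pvLoop stack out
      = out ++ stack.flatMap (fun f => (pvS f.1 f.2.1).map (fun s => String.mk (f.2.2 ++ s))) := by
  intro stack out
  fun_induction pvLoop stack out with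
  | case1 out => intro _; simp
  | case2 n acc stack out ih =>
    intro hinv
    rw [ih (fun f hf => hinv f (List.mem_cons_of_mem _ hf))]
    simp [pvS_zero]
  | case3 n r acc stack out h1 h2 ih =>
    intro hinv
    have hrn : r = n := le_antisymm (hinv _ List.mem_cons_self) h2
    subst hrn
    rw [ih (fun f hf => hinv f (List.mem_cons_of_mem _ hf))]
    simp [pvS_diag]
  | case4 n r acc stack out h1 h2 ih =>
    intro hinv
    have hn1 : r < n := by omega
    rw [ih ?_]
    · obtain ⟨m, rfl⟩ : ∃ m, n = m + 1 := ⟨n - 1, by omega⟩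
      obtain ⟨s, rfl⟩ : ∃ s, r = s + 1 := ⟨r - 1, by omega⟩
      simp only [List.flatMap_cons, Nat.add_sub_cancel]
      show out ++ _ = out ++ ((pvS (m + 1) (s + 1)).map _ ++ _)
      simp [pvS, List.map_map, Function.comp_def]
    · intro f hf
      rcases List.mem_cons.mp hf with rfl | hf2
      · simp; omega
      rcases List.mem_cons.mp hf2 with rfl | hf3
      · simp; omega
      · exact hinv f (List.mem_cons_of_mem _ hf3)

-- Nat-level combinations (same recursion as pvCombos, over Nat indices)
def pvCombosN : List Nat → Nat → List (List Nat)
  | _, 0 => [[]]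
  | [], _ + 1 => []
  | x :: xs, r + 1 => ((pvCombosN xs r).map (fun c => x :: c)) ++ pvCombosN xs (r + 1)

theorem pvCombosN_map (f : Nat → Nat) : ∀ (xs : List Nat) (r : Nat),
    pvCombosN (xs.map f) r = (pvCombosN xs r).map (List.map f) := by
  intro xs
  induction xs with
  | nil => intro r; cases r <;> simp [pvCombosN]
  | cons x xs ih =>
    intro r
    cases r with
    | zero => simp [pvCombosN]
    | succ r => simp [pvCombosN, ih r, ih (r+1), List.map_map, Function.comp_def]

theorem pvCombos_ofNat : ∀ (xs : List Nat) (r : Nat),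
    pvCombos (xs.map (fun (i : Nat) => (i : Int))) r
      = (pvCombosN xs r).map (List.map (fun (i : Nat) => (i : Int))) := by
  intro xs
  induction xs with
  | nil => intro r; cases r <;> simp [pvCombos, pvCombosN]
  | cons x xs ih =>
    intro r
    cases r with
    | zero => simp [pvCombos, pvCombosN]
    | succ r => simp [pvCombos, pvCombosN, ih r, ih (r+1), List.map_map, Function.comp_def]

def pvPlaceN (bs : List Char) (idxs : List Nat) : List Char :=
  idxs.foldl (fun b i => b.set i '1') bs

theorem pvPlaceOnes_ofNat (idxs : List Nat) : ∀ (bs : List Char),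
    pvPlaceOnes bs (idxs.map (fun (i : Nat) => (i : Int))) = pvPlaceN bs idxs := by
  induction idxs with
  | nil => intro bs; rfl
  | cons i idxs ih => intro bs; simp [pvPlaceOnes, pvPlaceN, List.foldl] at *; exact ih _

theorem pvPlaceN_shift : ∀ (idxs : List Nat) (x : Char) (bs : List Char),
    pvPlaceN (x :: bs) (idxs.map Nat.succ) = x :: pvPlaceN bs idxs := by
  intro idxs
  induction idxs with
  | nil => intro x bs; rfl
  | cons i idxs ih => intro x bs; simp [pvPlaceN, List.foldl] at *; exact ih x _

theorem pvPlaceN_zero (bs : List Char) (idxs : List Nat) :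
    pvPlaceN bs (0 :: idxs) = pvPlaceN (bs.set 0 '1') idxs := rfl

-- every combination of range(n) mapped through the string builder gives exactly pvS n r
theorem pvCombosN_S : ∀ (n r : Nat),
    (pvCombosN (List.range n) r).map (pvPlaceN (List.replicate n '0')) = pvS n r := by
  intro n
  induction n with
  | zero =>
    intro r
    cases r with
    | zero => rfl
    | succ r => rfl
  | succ n ih =>
    intro r
    cases r with
    | zero => simp [pvCombosN, pvS, pvPlaceN]
    | succ r =>
      rw [List.range_succ_eq_map]
      have hrepl : List.replicate (n + 1) '0' = '0' :: List.replicate n '0' := rfl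
      simp only [pvCombosN, pvS, List.map_append, List.map_map, pvCombosN_map Nat.succ]
      congr 1
      · -- '1' branch: combinations containing index 0
        rw [← ih r]
        simp only [List.map_map]
        apply List.map_congr_left
        intro c _
        simp only [Function.comp]
        rw [hrepl, pvPlaceN_zero]
        show pvPlaceN (('1' : Char) :: List.replicate n '0') (c.map Nat.succ) = _
        rw [pvPlaceN_shift]
      · -- '0' branch: combinations not containing index 0
        rw [← ih (r + 1)]
        simp only [List.map_map]
        apply List.map_congr_left
        intro c _
        simp only [Function.comp]
        rw [hrepl, pvPlaceN_shift]

-- ===== VERDICT (by name: the statement is the Claim_ definition above) =====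
theorem get_k_strings_spec : Claim_equal_get_k_strings := by
  intro k tl _ hpre
  obtain ⟨hk0, hktl⟩ := hpre
  unfold Spec_get_k_strings get_k_strings get_k_strings_alt
  have hneg : ¬ (k < 0 ∨ tl < k) := by omega
  rw [if_neg hneg, if_neg hneg]
  have hrange : PySem.List.pyRange 0 tl 1
      = (List.range tl.toNat).map (fun (i : Nat) => (i : Int)) := by
    rw [PySem.List.pyRange_one]
    simp
  rw [hrange, pvCombos_ofNat, List.map_map]
  have hstep : ((fun idxs => String.mk (pvPlaceOnes (List.replicate tl.toNat '0') idxs)) ∘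
      List.map (fun (i : Nat) => (i : Int)))
      = fun (c : List Nat) => String.mk (pvPlaceN (List.replicate tl.toNat '0') c) := by
    funext c
    simp [Function.comp, pvPlaceOnes_ofNat]
  rw [hstep]
  have hS : (pvCombosN (List.range tl.toNat) k.toNat).map
      (fun (c : List Nat) => String.mk (pvPlaceN (List.replicate tl.toNat '0') c))
      = (pvS tl.toNat k.toNat).map String.mk := by
    rw [← pvCombosN_S tl.toNat k.toNat, List.map_map]
    rfl
  rw [hS, pvLoop_eq_S [(tl.toNat, k.toNat, [])] []
        (by intro f hf; simp at hf; subst hf; simp; omega)]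
  simp
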